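-- pv_equiv track=rewrite | github.com/benjisidi/scrabblebot | scrabblebot_framework/utils/util.py | get_anchor_points
-- ===== SOURCE A (Python) =====
-- def get_anchor_points(board: list[str]):
--     # Temporarily pad board with 1 space around the outside for edge cases
--     padded_board = board.copy()
--     padded_board.append("_"*15)
--     padded_board.insert(0, "_"*15)
--     for i, row in enumerate(padded_board):
--         padded_board[i] = "_" + row + "_"
--     row_anchor_points = [set() for _ in padded_board]
--     # Iterate over each row in the board. Add anchor points to any
--     # adjacent spaces whenever a letter is found
--     for i, row in enumerate(padded_board):
--         for j, letter in enumerate(row):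
--             if letter != "_":
--                 if row[j-1] == "_":
--                     row_anchor_points[i].add(j-1)
--                 if row[j+1] == "_":
--                     row_anchor_points[i].add(j+1)
--                 if padded_board[i-1][j] == "_":
--                     row_anchor_points[i-1].add(j)
--                 if padded_board[i+1][j] == "_":
--                     row_anchor_points[i+1].add(j)
--     # Remove the padding rows and columns
--     row_anchor_points = row_anchor_points[1:-1]
--     for i in range(len(row_anchor_points)):
--         row_anchor_points[i] = set(
--             map(lambda x: x-1, filter(lambda x: x > 0 and x < 16, row_anchor_points[i])))
--     # Find the transpose of our sets for the column anchor points
--     col_anchor_points = [set() for _ in board]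
--     for col in range(len(board)):
--         for i, row in enumerate(row_anchor_points):
--             if col in row:
--                 col_anchor_points[col].add(i)
--     return row_anchor_points, col_anchor_points
-- ===== SOURCE B (Python) =====
-- def get_anchor_points(board: list[str]):
--     # Gather-style: each output row is computed independently from the letters in
--     # its own and adjacent rows, with no padding, no shared mutable state and no
--     # transpose pass.  Anchors live on the 15 board columns 0..14.
--     n = len(board)
--
--     def is_letter(y, x):
--         return 0 <= y < n and 0 <= x < len(board[y]) and board[y][x] != "_"
--
--     def row_anchors(y):
--         cand = []
--         if y > 0:
--             cand += [x for x, c in enumerate(board[y - 1]) if c != "_"]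
--         for x, c in enumerate(board[y]):
--             if c != "_":
--                 cand += [x - 1, x + 1]
--         if y + 1 < n:
--             cand += [x for x, c in enumerate(board[y + 1]) if c != "_"]
--         return {x for x in cand if 0 <= x <= 14 and not is_letter(y, x)}
--
--     row_anchor_points = [row_anchors(y) for y in range(n)]
--     col_anchor_points = [{y for y in range(n) if x in row_anchor_points[y]}
--                          for x in range(n)]
--     return row_anchor_points, col_anchor_points
-- ===== Notes on version B (the rewrite author's own statement) =====
-- stated objective: simpler
-- what changed: Replaces A's global scatter (pad the board, one mutating pass where every letter writes into 17 shared sets, then slice/filter/shift and a transpose double loop) by an independent per-row gather: each output row is built directly from the letter positions of its own and the two adjacent rows and filtered to empty in-board columns, with columns read off by a comprehension; no padding and no mutation. Pre_ excludes ragged boards on which A raises IndexError (a letter whose column lies beyond the end of an adjacent row).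
import Mathlib
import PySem

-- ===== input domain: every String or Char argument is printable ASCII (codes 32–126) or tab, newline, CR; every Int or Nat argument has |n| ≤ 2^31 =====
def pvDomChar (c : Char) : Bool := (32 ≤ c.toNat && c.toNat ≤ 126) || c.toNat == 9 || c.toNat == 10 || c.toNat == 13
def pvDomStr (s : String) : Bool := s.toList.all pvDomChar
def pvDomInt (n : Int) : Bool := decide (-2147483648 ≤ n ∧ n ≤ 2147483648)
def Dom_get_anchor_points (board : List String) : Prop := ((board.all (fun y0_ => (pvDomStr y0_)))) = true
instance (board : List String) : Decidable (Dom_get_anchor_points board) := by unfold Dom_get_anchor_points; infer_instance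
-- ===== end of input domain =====

-- B replaces A's global scatter pass (padding, one mutating sweep over letters into
-- shared sets, slice/filter/shift, transpose loop) by an independent per-row gather
-- from the adjacent rows' letters (simpler decomposition, no padding, no mutation).

-- shared primitive: Python's `xs[i].add(v)` on a list of sets (read/modify/write, Python index semantics)
def pvSetAt (xs : List (PySem.Set Int)) (i : Int) (v : Int) : List (PySem.Set Int) :=
  PySem.List.pySetD xs i (PySem.Set.add (PySem.List.pyGetD xs i []) v)

-- the padding A builds: one '_' border around the board (helper of port A)
def pvPadded (g : List (List Char)) : List (List Char) :=
  (List.replicate 15 '_' :: (g ++ [List.replicate 15 '_'])).map (fun r => '_' :: (r ++ ['_']))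

-- ===== PORT A =====
-- inner loop `for j, letter in enumerate(row)` (row[j±1]/padded_board[i±1][j] lookups
-- via pyGet?; `= some '_'` encodes the `== "_"` test: where Python would raise
-- IndexError, pyGet? is none and the port's test is False — such inputs are outside Pre_)
def aInner (pb : List (List Char)) (row : List Char) (i : Nat) (j : Nat)
    (cells : List Char) (rap : List (PySem.Set Int)) : List (PySem.Set Int) :=
  match cells with
  | [] => rap
  | c :: rest =>
    let rap1 :=
      if c ≠ '_' then
        let r0 := if PySem.List.pyGet? row ((j : Int) - 1) = some '_' then
                    pvSetAt rap (i : Int) ((j : Int) - 1) else rap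
        let r1 := if PySem.List.pyGet? row ((j : Int) + 1) = some '_' then
                    pvSetAt r0 (i : Int) ((j : Int) + 1) else r0
        let r2 := if (PySem.List.pyGet? pb ((i : Int) - 1)).bind
                      (fun r => PySem.List.pyGet? r (j : Int)) = some '_' then
                    pvSetAt r1 ((i : Int) - 1) (j : Int) else r1
        let r3 := if (PySem.List.pyGet? pb ((i : Int) + 1)).bind
                      (fun r => PySem.List.pyGet? r (j : Int)) = some '_' then
                    pvSetAt r2 ((i : Int) + 1) (j : Int) else r2
        r3
      else rap
    aInner pb row i (j + 1) rest rap1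

-- outer loop `for i, row in enumerate(padded_board)`
def aRows (pb : List (List Char)) (i : Nat) (rows : List (List Char))
    (rap : List (PySem.Set Int)) : List (PySem.Set Int) :=
  match rows with
  | [] => rap
  | r :: rest => aRows pb (i + 1) rest (aInner pb r i 0 r rap)

-- `for i, row in enumerate(row_anchor_points): if col in row: col_anchor_points[col].add(i)`
def aColInner (col : Int) (i : Nat) (rows : List (PySem.Set Int))
    (cap : List (PySem.Set Int)) : List (PySem.Set Int) :=
  match rows with
  | [] => cap
  | s :: rest =>
    aColInner col (i + 1) rest (if col ∈ s then pvSetAt cap col (i : Int) else cap)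

def get_anchor_points (board : List String) : List (List Int) × List (List Int) :=
  let g := board.map String.toList
  let padded := pvPadded g
  let rap := aRows padded 0 padded (padded.map fun _ => ([] : PySem.Set Int))
  let rap1 := PySem.List.slice rap (some 1) (some (-1))
  let rap2 := rap1.map (fun s =>
    PySem.Set.ofList ((s.filter (fun x => decide (x > 0) && decide (x < 16))).map (fun x => x - 1)))
  let cap := (PySem.List.pyRange 0 (board.length : Int) 1).foldl
    (fun cap col => aColInner col 0 rap2 cap) (g.map fun _ => ([] : PySem.Set Int))
  (rap2, cap)

-- ===== PORT B =====
-- `is_letter(y, x)` — every board[y][x] read is guarded in range by the preceding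
-- conjuncts (Python's short-circuit `and`), so pyGetD's default is never the value
def bLetter (g : List (List Char)) (y x : Int) : Bool :=
  decide (0 ≤ y) && decide (y < (g.length : Int)) && decide (0 ≤ x) &&
  decide (x < ((PySem.List.pyGetD g y []).length : Int)) &&
  decide (PySem.List.pyGetD (PySem.List.pyGetD g y []) x ' ' ≠ '_')

-- `[x for x, c in enumerate(row) if c != "_"]`
def bLetterCols (r : List Char) (x : Nat) : List Int :=
  match r with
  | [] => []
  | c :: rest => (if c ≠ '_' then [(x : Int)] else []) ++ bLetterCols rest (x + 1)

-- `for x, c in enumerate(row): if c != "_": cand += [x - 1, x + 1]`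
def bOwn (r : List Char) (x : Nat) : List Int :=
  match r with
  | [] => []
  | c :: rest => (if c ≠ '_' then [(x : Int) - 1, (x : Int) + 1] else []) ++ bOwn rest (x + 1)

-- `row_anchors(y)`
def bRowAnchors (g : List (List Char)) (y : Int) : PySem.Set Int :=
  let cand :=
    (if 0 < y then bLetterCols (PySem.List.pyGetD g (y - 1) []) 0 else []) ++
    bOwn (PySem.List.pyGetD g y []) 0 ++
    (if y + 1 < (g.length : Int) then bLetterCols (PySem.List.pyGetD g (y + 1) []) 0 else [])
  PySem.Set.ofList (cand.filter (fun x => decide (0 ≤ x) && decide (x ≤ 14) && !(bLetter g y x)))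

def get_anchor_points_alt (board : List String) : List (List Int) × List (List Int) :=
  let g := board.map String.toList
  let rows := (PySem.List.pyRange 0 (board.length : Int) 1).map (fun y => bRowAnchors g y)
  let cols := (PySem.List.pyRange 0 (board.length : Int) 1).map (fun x =>
    PySem.Set.ofList ((PySem.List.pyRange 0 (board.length : Int) 1).filter
      (fun y => decide (x ∈ PySem.List.pyGetD rows y []))))
  (rows, cols)

-- ===== PRECONDITION & SPEC =====
-- Pre_ holds exactly where the Python A returns normally: A raises IndexError iff some
-- letter at (i, j) lies beyond the end of the (padded) row above or below it — for an
-- edge row the padding rows have width 17, otherwise the neighbouring board row plus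
-- its own padding bounds j.
def Pre_get_anchor_points (board : List String) : Prop :=
  (∀ i, i < board.length → ∀ j, j < ((board.getD i "").toList).length →
    ((board.getD i "").toList).getD j ' ' ≠ '_' → (i = 0 → j ≤ 15)) ∧
  (∀ i, i < board.length → ∀ j, j < ((board.getD i "").toList).length →
    ((board.getD i "").toList).getD j ' ' ≠ '_' → (0 < i → j ≤ ((board.getD (i-1) "").toList).length)) ∧
  (∀ i, i < board.length → ∀ j, j < ((board.getD i "").toList).length →
    ((board.getD i "").toList).getD j ' ' ≠ '_' → (i + 1 = board.length → j ≤ 15)) ∧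
  (∀ i, i < board.length → ∀ j, j < ((board.getD i "").toList).length →
    ((board.getD i "").toList).getD j ' ' ≠ '_' → (i + 1 < board.length → j ≤ ((board.getD (i+1) "").toList).length))
set_option maxHeartbeats 1000000 in
instance (board : List String) : Decidable (Pre_get_anchor_points board) := by
  unfold Pre_get_anchor_points
  exact instDecidableAnd (dq := instDecidableAnd (dq := instDecidableAnd))

def pvWitness_get_anchor_points : List String :=
  ["_______________", "_______________", "_______________", "_______________",
   "_______________", "_______________", "_______ScRAB___", "_______________",
   "_______________", "_______________", "_______________", "_______________",
   "_______________", "_______________", "_______________"]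

def Spec_get_anchor_points (board : List String) (out : List (List Int) × List (List Int)) : Prop :=
  out = get_anchor_points_alt board
instance (board : List String) (out : List (List Int) × List (List Int)) :
    Decidable (Spec_get_anchor_points board out) := by unfold Spec_get_anchor_points; infer_instance

-- ===== CLAIM (what is proved, stated in full; the proofs are below) =====
def Claim_equal_get_anchor_points : Prop :=
  ∀ (board : List String), Dom_get_anchor_points board → Pre_get_anchor_points board →
    Spec_get_anchor_points board (get_anchor_points board)

-- ===== LEMMAS AND PROOFS =====
-- the offset/filter transformation A applies to a padded row set
def pvT (s : List Int) : List Int :=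
  (s.filter (fun x => decide (x > 0) && decide (x < 16))).map (fun x => x - 1)

-- the filter B applies to its candidate columns of row y
def pvP (g : List (List Char)) (y : Nat) : Int → Bool :=
  fun x => decide (0 ≤ x) && decide (x ≤ 14) && !(bLetter g (y : Int) x)

-- ===== padding-board access lemmas =====
theorem getD_row_mem (g : List (List Char)) (i : Nat) (hi : i < g.length) :
    g.getD i [] = g[i]'hi := List.getD_eq_getElem g [] hi

theorem pvPadded_length (g : List (List Char)) : (pvPadded g).length = g.length + 2 := by
  simp [pvPadded]

theorem pvPadded_get_zero (g : List (List Char)) :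
    (pvPadded g)[0]? = some ('_' :: (List.replicate 15 '_' ++ ['_'])) := by
  simp [pvPadded]

theorem pvPadded_get_last (g : List (List Char)) :
    (pvPadded g)[g.length + 1]? = some ('_' :: (List.replicate 15 '_' ++ ['_'])) := by
  simp [pvPadded]

theorem pvPadded_get_mid (g : List (List Char)) (i : Nat) (hi : i < g.length) :
    (pvPadded g)[i + 1]? = some ('_' :: (g.getD i [] ++ ['_'])) := by
  simp [pvPadded, List.getElem?_append, hi]

theorem prow_get_mid (r : List Char) (j : Nat) (h1 : 1 ≤ j) (h2 : j ≤ r.length) :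
    ('_' :: (r ++ ['_']))[j]? = some (r.getD (j - 1) ' ') := by
  obtain ⟨j', rfl⟩ : ∃ j', j = j' + 1 := ⟨j - 1, by omega⟩
  have hj' : j' < r.length := by omega
  simp [List.getElem?_append, hj']

theorem prow_get_end (r : List Char) :
    ('_' :: (r ++ ['_']))[r.length + 1]? = some '_' := by
  simp

theorem prow_all_pad (x : Char) (hx : x ∈ ('_' :: (List.replicate 15 '_' ++ ['_']))) :
    x = '_' := by
  simpa using hx

theorem slice_mid (xs : List (PySem.Set Int)) (n : Nat) (h : xs.length = n + 2) :
    PySem.List.slice xs (some 1) (some (-1)) = (xs.drop 1).take n := by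
  simp [PySem.List.slice, h]

theorem getD_map_const (xs : List (List Char)) (m : Nat) :
    (xs.map (fun _ => ([] : PySem.Set Int))).getD m [] = [] := by
  simp only [List.getD, List.getElem?_map]
  cases xs[m]? <;> rfl

-- ===== A's pass as a list of (target row, column) events =====
def evCell (pb : List (List Char)) (row : List Char) (i j : Nat) (c : Char) : List (Int × Int) :=
  if c ≠ '_' then
    (if PySem.List.pyGet? row ((j : Int) - 1) = some '_' then [((i : Int), (j : Int) - 1)] else []) ++
    (if PySem.List.pyGet? row ((j : Int) + 1) = some '_' then [((i : Int), (j : Int) + 1)] else []) ++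
    (if (PySem.List.pyGet? pb ((i : Int) - 1)).bind (fun r => PySem.List.pyGet? r (j : Int)) = some '_'
       then [((i : Int) - 1, (j : Int))] else []) ++
    (if (PySem.List.pyGet? pb ((i : Int) + 1)).bind (fun r => PySem.List.pyGet? r (j : Int)) = some '_'
       then [((i : Int) + 1, (j : Int))] else [])
  else []

def evRow (pb : List (List Char)) (row : List Char) (i j : Nat) (cells : List Char) : List (Int × Int) :=
  match cells with
  | [] => []
  | c :: rest => evCell pb row i j c ++ evRow pb row i (j + 1) rest

def evBoard (pb : List (List Char)) (i : Nat) (rows : List (List Char)) : List (Int × Int) :=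
  match rows with
  | [] => []
  | r :: rest => evRow pb r i 0 r ++ evBoard pb (i + 1) rest

def applyEv (es : List (Int × Int)) (acc : List (PySem.Set Int)) : List (PySem.Set Int) :=
  es.foldl (fun a e => pvSetAt a e.1 e.2) acc

def gatherRow (pb : List (List Char)) (s : Nat) (t : Nat) : List (Int × Int) :=
  (evRow pb (pb.getD s []) s 0 (pb.getD s [])).filter (fun e => e.1 == (t : Int))

theorem length_pvSetAt (xs : List (PySem.Set Int)) (I : Int) (v : Int) :
    (pvSetAt xs I v).length = xs.length := by
  simp [pvSetAt, PySem.List.length_pySetD]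

theorem getD_pvSetAt (xs : List (PySem.Set Int)) (I : Int) (v : Int) (m : Nat)
    (h0 : 0 ≤ I) (h1 : I < xs.length) :
    (pvSetAt xs I v).getD m [] =
      if (m : Int) = I then PySem.Set.add (xs.getD m []) v else xs.getD m [] := by
  have hlt : I.toNat < xs.length := by omega
  have hget : PySem.List.pyGetD xs I [] = xs[I.toNat] :=
    PySem.List.pyGetD_eq_getElem xs [] h0 h1
  have hset : pvSetAt xs I v = xs.set I.toNat (PySem.Set.add xs[I.toNat] v) := by
    rw [pvSetAt, hget, PySem.List.pySetD_of_nonneg xs _ h0]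
  rw [hset]
  by_cases hm : (m : Int) = I
  · have hmI : m = I.toNat := by omega
    subst hmI
    simp [List.getD, hlt]
    exact fun hneg => absurd hneg (by omega)
  · have hne : I.toNat ≠ m := by omega
    simp [List.getD, List.getElem?_set_ne hne, hm]

theorem applyEv_append (a b : List (Int × Int)) (acc : List (PySem.Set Int)) :
    applyEv (a ++ b) acc = applyEv b (applyEv a acc) := by
  simp [applyEv, List.foldl_append]

theorem applyEv_length (es : List (Int × Int)) :
    ∀ acc : List (PySem.Set Int), (applyEv es acc).length = acc.length := by
  induction es with
  | nil => intro acc; rfl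
  | cons e rest ih =>
    intro acc
    simp only [applyEv, List.foldl_cons]
    rw [show List.foldl (fun a e => pvSetAt a e.1 e.2) (pvSetAt acc e.1 e.2) rest =
      applyEv rest (pvSetAt acc e.1 e.2) from rfl, ih, length_pvSetAt]

theorem applyEv_getD (es : List (Int × Int)) :
    ∀ (acc : List (PySem.Set Int)) (k : Nat),
    (∀ e ∈ es, 0 ≤ e.1 ∧ e.1 < (acc.length : Int)) → k < acc.length →
    (applyEv es acc).getD k [] =
      ((es.filter (fun e => e.1 == (k : Int))).map Prod.snd).foldl PySem.Set.add (acc.getD k []) := by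
  induction es with
  | nil => intro acc k _ _; rfl
  | cons e rest ih =>
    intro acc k hr hk
    have he := hr e (by simp)
    have hstep : applyEv (e :: rest) acc = applyEv rest (pvSetAt acc e.1 e.2) := rfl
    rw [hstep, ih (pvSetAt acc e.1 e.2) k
      (by intro e' he'; rw [length_pvSetAt]; exact hr e' (by simp [he']))
      (by rw [length_pvSetAt]; exact hk)]
    rw [getD_pvSetAt acc e.1 e.2 k he.1 he.2]
    by_cases hm : (k : Int) = e.1
    · rw [if_pos hm, List.filter_cons_of_pos (by simp [hm]), List.map_cons, List.foldl_cons]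
    · rw [if_neg hm, List.filter_cons_of_neg (by simp; omega)]

theorem aInner_eq_applyEv (pb : List (List Char)) (row : List Char) (i : Nat) :
    ∀ (cells : List Char) (j : Nat) (rap : List (PySem.Set Int)),
    aInner pb row i j cells rap = applyEv (evRow pb row i j cells) rap := by
  intro cells
  induction cells with
  | nil => intro j rap; rfl
  | cons c rest ih =>
    intro j rap
    rw [evRow, applyEv_append, ← ih (j+1)]
    show aInner pb row i j (c :: rest) rap = aInner pb row i (j+1) rest (applyEv (evCell pb row i j c) rap)
    rw [aInner]
    congr 1
    by_cases hc : c = '_'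
    · simp [evCell, hc, applyEv]
    · simp only [evCell, if_pos (by simp [hc] : c ≠ '_')]
      split_ifs <;> simp [applyEv, *]

theorem aRows_eq_applyEv (pb : List (List Char)) :
    ∀ (rows : List (List Char)) (i : Nat) (rap : List (PySem.Set Int)),
    aRows pb i rows rap = applyEv (evBoard pb i rows) rap := by
  intro rows
  induction rows with
  | nil => intro i rap; rfl
  | cons r rest ih =>
    intro i rap
    rw [evBoard, applyEv_append, aRows, ih, aInner_eq_applyEv]

theorem mem_evRow_fst (pb : List (List Char)) (row : List Char) (i : Nat) :
    ∀ (cells : List Char) (j : Nat) (e : Int × Int), e ∈ evRow pb row i j cells →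
      e.1 = (i : Int) - 1 ∨ e.1 = (i : Int) ∨ e.1 = (i : Int) + 1 := by
  intro cells
  induction cells with
  | nil => intro j e he; simp [evRow] at he
  | cons c rest ih =>
    intro j e he
    rw [evRow, List.mem_append] at he
    rcases he with he | he
    · unfold evCell at he
      split_ifs at he <;> simp at he <;> rcases he with rfl | rfl | rfl | rfl <;> simp
    · exact ih (j+1) e he

theorem evRow_of_blank (pb : List (List Char)) (row : List Char) (i : Nat) :
    ∀ (cells : List Char) (j : Nat), (∀ c ∈ cells, c = '_') →
      evRow pb row i j cells = [] := by
  intro cells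
  induction cells with
  | nil => intro j _; rfl
  | cons c rest ih =>
    intro j hall
    rw [evRow, ih (j+1) (fun c' hc' => hall c' (by simp [hc'])),
      List.append_nil, evCell, if_neg (by simp [hall c (by simp)])]

theorem evBoard_fst_range_aux (pb : List (List Char)) (N : Nat) :
    ∀ (rows : List (List Char)) (i0 : Nat),
    (∀ s r, rows[s]? = some r → (∀ c ∈ r, c = '_') ∨ (1 ≤ i0 + s ∧ i0 + s ≤ N)) →
    ∀ e ∈ evBoard pb i0 rows, 0 ≤ e.1 ∧ e.1 < (N : Int) + 2 := by
  intro rows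
  induction rows with
  | nil => intro i0 _ e he; simp [evBoard] at he
  | cons r rest ih =>
    intro i0 hgood e he
    rw [evBoard, List.mem_append] at he
    rcases he with he | he
    · rcases hgood 0 r (by simp) with hb | hb
      · rw [evRow_of_blank pb r i0 r 0 hb] at he
        simp at he
      · rcases mem_evRow_fst pb r i0 r 0 e he with h | h | h <;> simp at hb <;> omega
    · refine ih (i0 + 1) ?_ e he
      intro s r' hs
      rcases hgood (s + 1) r' (by simpa using hs) with h | h
      · exact Or.inl h
      · exact Or.inr (by omega)

theorem evBoard_fst_range (g : List (List Char)) :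
    ∀ e ∈ evBoard (pvPadded g) 0 (pvPadded g),
      0 ≤ e.1 ∧ e.1 < ((pvPadded g).length : Int) := by
  have hgood : ∀ s r, (pvPadded g)[s]? = some r →
      (∀ c ∈ r, c = '_') ∨ (1 ≤ 0 + s ∧ 0 + s ≤ g.length) := by
    intro s r hs
    have hlt : s < g.length + 2 := by
      have h := List.getElem?_eq_some_iff.mp hs
      rw [← pvPadded_length g]
      exact h.1
    by_cases hs0 : s = 0
    · subst hs0
      rw [pvPadded_get_zero g] at hs
      have hr : '_' :: (List.replicate 15 '_' ++ ['_']) = r := Option.some.inj hs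
      exact Or.inl (fun c hc => prow_all_pad c (hr ▸ hc))
    · by_cases hsl : s = g.length + 1
      · subst hsl
        rw [pvPadded_get_last g] at hs
        have hr : '_' :: (List.replicate 15 '_' ++ ['_']) = r := Option.some.inj hs
        exact Or.inl (fun c hc => prow_all_pad c (hr ▸ hc))
      · exact Or.inr ⟨by omega, by omega⟩
  intro e he
  have hmain := evBoard_fst_range_aux (pvPadded g) g.length (pvPadded g) 0 hgood e he
  rw [pvPadded_length]
  push_cast
  exact ⟨hmain.1, by omega⟩

theorem filter_evRow_nil (pb : List (List Char)) (row : List Char) (i t : Nat)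
    (h : (i : Int) - 1 ≠ (t : Int) ∧ (i : Int) ≠ (t : Int) ∧ (i : Int) + 1 ≠ (t : Int)) :
    ∀ (cells : List Char) (j : Nat),
    (evRow pb row i j cells).filter (fun e => e.1 == (t : Int)) = [] := by
  obtain ⟨ha, hb, hc⟩ := h
  intro cells j
  rw [List.filter_eq_nil_iff]
  intro e he
  rcases mem_evRow_fst pb row i cells j e he with h1 | h1 | h1 <;> simp [h1] <;> omega

theorem filter_evBoard_skip (pb : List (List Char)) (t : Nat) :
    ∀ (rows : List (List Char)) (i0 : Nat), (t : Int) + 1 < (i0 : Int) →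
    (evBoard pb i0 rows).filter (fun e => e.1 == (t : Int)) = [] := by
  intro rows
  induction rows with
  | nil => intro i0 _; rfl
  | cons r rest ih =>
    intro i0 h
    rw [evBoard, List.filter_append,
      filter_evRow_nil pb r i0 t ⟨by omega, by omega, by omega⟩ r 0,
      ih (i0 + 1) (by push_cast; omega), List.append_nil]

theorem filter_evBoard_from (pb : List (List Char)) (t : Nat) (hlen : t + 1 < pb.length) (ht : 1 ≤ t) :
    ∀ (k i0 : Nat), i0 + k = t - 1 →
    (evBoard pb i0 (pb.drop i0)).filter (fun e => e.1 == (t : Int)) =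
      gatherRow pb (t - 1) t ++ gatherRow pb t t ++ gatherRow pb (t + 1) t := by
  intro k
  induction k with
  | zero =>
    intro i0 h0
    have hi0 : i0 = t - 1 := by omega
    subst hi0
    have h1 : t - 1 < pb.length := by omega
    have h2 : t < pb.length := by omega
    rw [List.drop_eq_getElem_cons h1, evBoard,
      show t - 1 + 1 = t from by omega,
      List.drop_eq_getElem_cons h2, evBoard,
      List.drop_eq_getElem_cons hlen, evBoard,
      List.filter_append, List.filter_append, List.filter_append,
      filter_evBoard_skip pb t _ (t + 1 + 1) (by push_cast; omega),
      List.append_nil, gatherRow, gatherRow, gatherRow,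
      getD_row_mem pb (t - 1) h1, getD_row_mem pb t h2, getD_row_mem pb (t + 1) hlen,
      List.append_assoc]
  | succ k ih =>
    intro i0 h0
    have hi0 : i0 < pb.length := by omega
    rw [List.drop_eq_getElem_cons hi0, evBoard, List.filter_append,
      filter_evRow_nil pb _ i0 t ⟨by omega, by omega, by omega⟩ _ 0,
      List.nil_append]
    exact ih (i0 + 1) (by omega)

theorem filter_evBoard_window (pb : List (List Char)) (t : Nat) (ht : 1 ≤ t)
    (hlen : t + 1 < pb.length) :
    (evBoard pb 0 pb).filter (fun e => e.1 == (t : Int)) =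
      gatherRow pb (t - 1) t ++ gatherRow pb t t ++ gatherRow pb (t + 1) t := by
  have h := filter_evBoard_from pb t hlen ht (t - 1) 0 (by omega)
  simpa using h

-- dedup commutes with filter and an injective map
theorem ofList_filter_comm (p : Int → Bool) (l : List Int) :
    PySem.Set.ofList (l.filter p) = (PySem.Set.ofList l).filter p := by
  induction l using List.reverseRecOn with
  | nil => rfl
  | append_singleton l x ih =>
    rw [List.filter_append, PySem.Set.ofList_append_singleton]
    by_cases hp : p x = true
    · rw [show List.filter p [x] = [x] from by simp [List.filter, hp],
        PySem.Set.ofList_append_singleton, ih]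
      by_cases hmem : x ∈ PySem.Set.ofList l
      · rw [PySem.Set.add_of_mem hmem, PySem.Set.add_of_mem (List.mem_filter.mpr ⟨hmem, hp⟩)]
      · rw [PySem.Set.add_of_not_mem hmem, PySem.Set.add_of_not_mem
          (fun hx => hmem (List.mem_filter.mp hx).1), List.filter_append,
          show List.filter p [x] = [x] from by simp [List.filter, hp]]
    · rw [show List.filter p [x] = [] from by simp [List.filter, hp], List.append_nil, ih]
      by_cases hmem : x ∈ PySem.Set.ofList l
      · rw [PySem.Set.add_of_mem hmem]
      · rw [PySem.Set.add_of_not_mem hmem, List.filter_append,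
          show List.filter p [x] = [] from by simp [List.filter, hp], List.append_nil]

theorem ofList_map_sub_one (l : List Int) :
    PySem.Set.ofList (l.map (fun x => x - 1)) = (PySem.Set.ofList l).map (fun x => x - 1) := by
  induction l using List.reverseRecOn with
  | nil => rfl
  | append_singleton l x ih =>
    simp only [List.map_append, List.map_cons, List.map_nil]
    rw [PySem.Set.ofList_append_singleton, PySem.Set.ofList_append_singleton, ih]
    by_cases hmem : x ∈ PySem.Set.ofList l
    · rw [PySem.Set.add_of_mem hmem,
        PySem.Set.add_of_mem (List.mem_map.mpr ⟨x, hmem, rfl⟩)]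
    · have hnm : x - 1 ∉ (PySem.Set.ofList l).map (fun x => x - 1) := by
        intro hx
        obtain ⟨a, ha, he⟩ := List.mem_map.mp hx
        have hax : a = x := by omega
        exact hmem (hax ▸ ha)
      rw [PySem.Set.add_of_not_mem hmem, PySem.Set.add_of_not_mem hnm, List.map_append,
        List.map_cons, List.map_nil]

theorem ofList_pvT_ofList (l : List Int) :
    PySem.Set.ofList (pvT (PySem.Set.ofList l)) = PySem.Set.ofList (pvT l) := by
  simp only [pvT]
  rw [← ofList_filter_comm, ← ofList_map_sub_one, PySem.Set.ofList_ofList]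


theorem pvT_append (a b : List Int) : pvT (a ++ b) = pvT a ++ pvT b := by
  simp [pvT]

theorem pvT_singleton (v : Int) :
    pvT [v] = if 0 < v ∧ v < 16 then [v - 1] else [] := by
  by_cases h : 0 < v ∧ v < 16
  · rw [if_pos h]
    simp only [pvT, List.filter_cons, List.filter_nil]
    rw [if_pos (by simp; omega)]
    rfl
  · rw [if_neg h]
    simp only [pvT, List.filter_cons, List.filter_nil]
    rw [if_neg (by simp; omega)]
    rfl

theorem bLetter_lt (g : List (List Char)) (y x : Nat) (hy : y < g.length)
    (hx : x < (g.getD y []).length) :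
    bLetter g (y : Int) (x : Int) = decide ((g.getD y []).getD x ' ' ≠ '_') := by
  unfold bLetter
  simp only [PySem.List.pyGetD_natCast]
  rw [show decide (0 ≤ (y : Int)) = true from decide_eq_true (Int.natCast_nonneg y),
    show decide ((y : Int) < (g.length : Int)) = true from decide_eq_true (by exact_mod_cast hy),
    show decide (0 ≤ (x : Int)) = true from decide_eq_true (Int.natCast_nonneg x),
    show decide ((x : Int) < ((g.getD y []).length : Int)) = true from
      decide_eq_true (by exact_mod_cast hx)]
  simp

theorem bLetter_ge (g : List (List Char)) (y x : Nat) (hx : (g.getD y []).length ≤ x) :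
    bLetter g (y : Int) (x : Int) = false := by
  unfold bLetter
  simp only [PySem.List.pyGetD_natCast]
  rw [show decide ((x : Int) < ((g.getD y []).length : Int)) = false from
      decide_eq_false (by omega)]
  simp

theorem lookup_prow (g : List (List Char)) (y x : Nat) (hy : y < g.length)
    (hx : x ≤ (g.getD y []).length) :
    (PySem.List.pyGet? (pvPadded g) ((y : Int) + 1)).bind
        (fun r => PySem.List.pyGet? r ((x + 1 : Nat) : Int)) =
      some (if x = (g.getD y []).length then '_' else (g.getD y []).getD x ' ') := by
  rw [show ((y : Int) + 1) = ((y + 1 : Nat) : Int) from by push_cast; ring,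
    PySem.List.pyGet?_natCast, pvPadded_get_mid g y hy]
  simp only [Option.bind_some]
  rw [PySem.List.pyGet?_natCast]
  by_cases hxe : x = (g.getD y []).length
  · rw [if_pos hxe, show x + 1 = (g.getD y []).length + 1 from by omega, prow_get_end]
  · rw [if_neg hxe, prow_get_mid _ (x + 1) (by omega) (by omega)]
    simp

theorem lookup_prow_self (g : List (List Char)) (y x : Nat)
    (hx : x ≤ (g.getD y []).length + 1) :
    PySem.List.pyGet? ('_' :: (g.getD y [] ++ ['_'])) ((x : Nat) : Int) =
      some (if x = 0 then '_' else if x = (g.getD y []).length + 1 then '_'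
            else (g.getD y []).getD (x - 1) ' ') := by
  rw [PySem.List.pyGet?_natCast]
  by_cases h0 : x = 0
  · subst h0
    simp
  · by_cases hend : x = (g.getD y []).length + 1
    · rw [if_neg h0, if_pos hend, hend, prow_get_end]
    · rw [if_neg h0, if_neg hend, prow_get_mid _ x (by omega) (by omega)]

theorem head_core (g : List (List Char)) (y w : Nat) (hy : y < g.length)
    (hw : w ≤ (g.getD y []).length) (v : Char)
    (hv : v = (if w = (g.getD y []).length then '_' else (g.getD y []).getD w ' ')) :
    pvT (if (some v : Option Char) = some '_' then [((w + 1 : Nat) : Int)] else []) =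
      List.filter (pvP g y) [(w : Int)] := by
  rw [List.filter_singleton]
  by_cases hemp : v = '_'
  · rw [if_pos (by rw [hemp])]
    have hbl : bLetter g (y : Int) (w : Int) = false := by
      by_cases hwe : w = (g.getD y []).length
      · exact bLetter_ge g y w (by omega)
      · rw [bLetter_lt g y w hy (by omega)]
        rw [if_neg hwe] at hv
        rw [← hv]
        simp [hemp]
    rw [pvT_singleton]
    by_cases h14 : w ≤ 14
    · have hPt : pvP g y (w : Int) = true := by
        unfold pvP
        rw [hbl]
        simp
        omega
      rw [if_pos (show 0 < ((w + 1 : Nat) : Int) ∧ ((w + 1 : Nat) : Int) < 16 from by push_cast; omega),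
        hPt, show ((w + 1 : Nat) : Int) - 1 = (w : Int) from by push_cast; ring]
      rfl
    · have hPf : pvP g y (w : Int) = false := by
        unfold pvP
        rw [show decide ((w : Int) ≤ 14) = false from by simp; omega]
        simp
      rw [hPf, if_neg (show ¬(0 < ((w + 1 : Nat) : Int) ∧ ((w + 1 : Nat) : Int) < 16) from by
        push_cast; omega)]
      rfl
  · rw [if_neg (fun h => hemp (Option.some.inj h))]
    have hwe : w ≠ (g.getD y []).length := fun h => hemp (by rw [hv, if_pos h])
    rw [if_neg hwe] at hv
    have hbl : bLetter g (y : Int) (w : Int) = true := by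
      rw [bLetter_lt g y w hy (by omega), ← hv]
      simp [hemp]
    have hPf : pvP g y (w : Int) = false := by
      unfold pvP
      rw [hbl]
      simp
    rw [hPf]
    rfl

theorem head_vert (g : List (List Char)) (y x : Nat) (hy : y < g.length)
    (hx : x ≤ (g.getD y []).length) :
    pvT (if (PySem.List.pyGet? (pvPadded g) ((y : Int) + 1)).bind
          (fun r => PySem.List.pyGet? r ((x + 1 : Nat) : Int)) = some '_'
        then [((x + 1 : Nat) : Int)] else []) =
      List.filter (pvP g y) [(x : Int)] := by
  rw [lookup_prow g y x hy hx]
  exact head_core g y x hy hx _ rfl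

theorem head_own_left (g : List (List Char)) (y x : Nat) (hy : y < g.length)
    (hxlt : x < (g.getD y []).length) :
    pvT (if PySem.List.pyGet? ('_' :: (g.getD y [] ++ ['_'])) (((x + 1 : Nat) : Int) - 1) = some '_'
        then [((x + 1 : Nat) : Int) - 1] else []) =
      List.filter (pvP g y) [(x : Int) - 1] := by
  rw [show (((x + 1 : Nat) : Int) - 1) = ((x : Nat) : Int) from by push_cast; ring,
    lookup_prow_self g y x (by omega)]
  by_cases h0 : x = 0
  · subst h0
    rw [show (if (0 : Nat) = 0 then '_' else if (0 : Nat) = (g.getD y []).length + 1 then '_'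
          else (g.getD y []).getD (0 - 1) ' ') = '_' from by simp,
      if_pos rfl, pvT_singleton,
      if_neg (show ¬(0 < (((0 : Nat) : Nat) : Int) ∧ (((0 : Nat) : Nat) : Int) < 16) from by simp),
      List.filter_singleton,
      show pvP g y (((0 : Nat) : Int) - 1) = false from by
        unfold pvP
        rw [show decide (0 ≤ (((0 : Nat) : Int) - 1)) = false from decide_eq_false (by simp)]
        simp]
    rfl
  · rw [if_neg h0, if_neg (show ¬(x = (g.getD y []).length + 1) from by omega)]
    rw [show ((x : Int) - 1) = ((x - 1 : Nat) : Int) from by omega,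
      show ((x : Nat) : Int) = ((x - 1 + 1 : Nat) : Int) from by omega]
    exact head_core g y (x - 1) hy (by omega) _ (by rw [if_neg (by omega)])

theorem head_own_right (g : List (List Char)) (y x : Nat) (hy : y < g.length)
    (hxlt : x < (g.getD y []).length) :
    pvT (if PySem.List.pyGet? ('_' :: (g.getD y [] ++ ['_'])) (((x + 1 : Nat) : Int) + 1) = some '_'
        then [((x + 1 : Nat) : Int) + 1] else []) =
      List.filter (pvP g y) [(x : Int) + 1] := by
  rw [show (((x + 1 : Nat) : Int) + 1) = ((x + 2 : Nat) : Int) from by push_cast; ring,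
    lookup_prow_self g y (x + 2) (by omega),
    if_neg (show ¬(x + 2 = 0) from by omega)]
  rw [show ((x + 2 : Nat) : Int) = ((x + 1 + 1 : Nat) : Int) from rfl,
    show ((x : Int) + 1) = ((x + 1 : Nat) : Int) from by push_cast; ring]
  refine head_core g y (x + 1) hy (by omega) _ ?_
  by_cases hxl : x + 1 = (g.getD y []).length
  · rw [if_pos (show x + 2 = (g.getD y []).length + 1 from by omega), if_pos hxl]
  · rw [if_neg (show ¬(x + 2 = (g.getD y []).length + 1) from by omega), if_neg hxl,
      show x + 2 - 1 = x + 1 from by omega]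

theorem filter_if_singleton_neg {α : Type} (p : α → Bool) (P : Prop) [Decidable P] (e : α)
    (hpe : p e = false) : (if P then [e] else []).filter p = [] := by
  split_ifs <;> simp [List.filter, hpe]

theorem filter_if_singleton_pos {α : Type} (p : α → Bool) (P : Prop) [Decidable P] (e : α)
    (hpe : p e = true) : (if P then [e] else []).filter p = if P then [e] else [] := by
  split_ifs <;> simp [List.filter, hpe]

theorem evCell_filter_down (pb : List (List Char)) (row : List Char) (s j : Nat) (c : Char)
    (t : Int) (ht : t = (s : Int) + 1) :
    (evCell pb row s j c).filter (fun e => e.1 == t) =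
      if c ≠ '_' ∧ (PySem.List.pyGet? pb ((s : Int) + 1)).bind
          (fun r => PySem.List.pyGet? r ((j : Nat) : Int)) = some '_'
      then [(t, ((j : Nat) : Int))] else [] := by
  subst ht
  have e1 : (((s : Int)) == (s : Int) + 1) = false := by rw [beq_eq_false_iff_ne]; omega
  have e2 : (((s : Int) - 1) == (s : Int) + 1) = false := by rw [beq_eq_false_iff_ne]; omega
  have e3 : (((s : Int) + 1) == (s : Int) + 1) = true := by simp
  unfold evCell
  by_cases hc : c = '_'
  · simp [hc]
  · rw [if_pos hc, List.filter_append, List.filter_append, List.filter_append,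
      filter_if_singleton_neg (fun e => e.1 == (s : Int) + 1) _ ((s : Int), (j : Int) - 1) e1,
      filter_if_singleton_neg (fun e => e.1 == (s : Int) + 1) _ ((s : Int), (j : Int) + 1) e1,
      filter_if_singleton_neg (fun e => e.1 == (s : Int) + 1) _ ((s : Int) - 1, (j : Int)) e2,
      filter_if_singleton_pos (fun e => e.1 == (s : Int) + 1) _ ((s : Int) + 1, (j : Int)) e3]
    simp [hc]

theorem evCell_filter_own (pb : List (List Char)) (row : List Char) (s j : Nat) (c : Char)
    (t : Int) (ht : t = (s : Int)) :
    (evCell pb row s j c).filter (fun e => e.1 == t) =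
      (if c ≠ '_' ∧ PySem.List.pyGet? row (((j : Nat) : Int) - 1) = some '_'
        then [(t, ((j : Nat) : Int) - 1)] else []) ++
      (if c ≠ '_' ∧ PySem.List.pyGet? row (((j : Nat) : Int) + 1) = some '_'
        then [(t, ((j : Nat) : Int) + 1)] else []) := by
  subst ht
  have e1 : (((s : Int)) == (s : Int)) = true := by simp
  have e2 : (((s : Int) - 1) == (s : Int)) = false := by rw [beq_eq_false_iff_ne]; omega
  have e3 : (((s : Int) + 1) == (s : Int)) = false := by rw [beq_eq_false_iff_ne]; omega
  unfold evCell
  by_cases hc : c = '_'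
  · simp [hc]
  · rw [if_pos hc, List.filter_append, List.filter_append, List.filter_append,
      filter_if_singleton_pos (fun e => e.1 == (s : Int)) _ ((s : Int), (j : Int) - 1) e1,
      filter_if_singleton_pos (fun e => e.1 == (s : Int)) _ ((s : Int), (j : Int) + 1) e1,
      filter_if_singleton_neg (fun e => e.1 == (s : Int)) _ ((s : Int) - 1, (j : Int)) e2,
      filter_if_singleton_neg (fun e => e.1 == (s : Int)) _ ((s : Int) + 1, (j : Int)) e3]
    simp [hc]

theorem evCell_filter_up (pb : List (List Char)) (row : List Char) (s j : Nat) (c : Char)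
    (t : Int) (ht : t = (s : Int) - 1) :
    (evCell pb row s j c).filter (fun e => e.1 == t) =
      if c ≠ '_' ∧ (PySem.List.pyGet? pb ((s : Int) - 1)).bind
          (fun r => PySem.List.pyGet? r ((j : Nat) : Int)) = some '_'
      then [(t, ((j : Nat) : Int))] else [] := by
  subst ht
  have e1 : (((s : Int)) == (s : Int) - 1) = false := by rw [beq_eq_false_iff_ne]; omega
  have e2 : (((s : Int) - 1) == (s : Int) - 1) = true := by simp
  have e3 : (((s : Int) + 1) == (s : Int) - 1) = false := by rw [beq_eq_false_iff_ne]; omega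
  unfold evCell
  by_cases hc : c = '_'
  · simp [hc]
  · rw [if_pos hc, List.filter_append, List.filter_append, List.filter_append,
      filter_if_singleton_neg (fun e => e.1 == (s : Int) - 1) _ ((s : Int), (j : Int) - 1) e1,
      filter_if_singleton_neg (fun e => e.1 == (s : Int) - 1) _ ((s : Int), (j : Int) + 1) e1,
      filter_if_singleton_pos (fun e => e.1 == (s : Int) - 1) _ ((s : Int) - 1, (j : Int)) e2,
      filter_if_singleton_neg (fun e => e.1 == (s : Int) - 1) _ ((s : Int) + 1, (j : Int)) e3]
    simp [hc]

theorem evRow_append (pb : List (List Char)) (row : List Char) (i : Nat) :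
    ∀ (a b : List Char) (j : Nat),
    evRow pb row i j (a ++ b) = evRow pb row i j a ++ evRow pb row i (j + a.length) b := by
  intro a
  induction a with
  | nil => intro b j; simp [evRow]
  | cons c rest ih =>
    intro b j
    rw [List.cons_append, evRow, ih b (j + 1), evRow, List.append_assoc,
      show j + 1 + rest.length = j + (c :: rest).length from by simp; omega]

theorem evRow_prow (pb : List (List Char)) (r : List Char) (s : Nat) (prow : List Char) :
    evRow pb prow s 0 ('_' :: (r ++ ['_'])) = evRow pb prow s 1 r := by
  rw [evRow, evRow_append pb prow s r ['_'] 1]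
  have h1 : evCell pb prow s 0 '_' = [] := by simp [evCell]
  have h2 : evRow pb prow s (1 + r.length) ['_'] = [] := by
    rw [evRow, evRow]
    simp [evCell]
  rw [h1, h2, List.nil_append, List.append_nil]

theorem above_aux (g : List (List Char)) (y : Nat) (hy : y < g.length) (prow : List Char) :
    ∀ (cells : List Char) (x : Nat),
    (∀ d, d < cells.length → cells.getD d ' ' ≠ '_' → x + d ≤ (g.getD y []).length) →
    pvT (((evRow (pvPadded g) prow y (x + 1) cells).filter
        (fun e => e.1 == ((y : Int) + 1))).map Prod.snd)
      = (bLetterCols cells x).filter (pvP g y) := by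
  intro cells
  induction cells with
  | nil => intro x _; rfl
  | cons c rest ih =>
    intro x hpre
    rw [evRow, List.filter_append, List.map_append, pvT_append, bLetterCols, List.filter_append,
      ih (x + 1) (fun d hd hc => by
        have h := hpre (d + 1) (by simp only [List.length_cons]; omega) (by simpa using hc)
        omega)]
    congr 1
    rw [evCell_filter_down (pvPadded g) prow y (x + 1) c ((y : Int) + 1) rfl]
    by_cases hc : c = '_'
    · simp [hc, pvT]
    · have hx : x ≤ (g.getD y []).length := by
        have h := hpre 0 (by simp) (by simpa using hc)
        omega
      rw [show (if c ≠ '_' then [(x : Int)] else []) = [(x : Int)] from by simp [hc]]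
      simp only [ne_eq, hc, not_false_iff, true_and]
      rw [apply_ite (List.map Prod.snd)]
      simp only [List.map_cons, List.map_nil]
      exact head_vert g y x hy hx

theorem below_aux (g : List (List Char)) (y : Nat) (hy : y < g.length) (prow : List Char) :
    ∀ (cells : List Char) (x : Nat),
    (∀ d, d < cells.length → cells.getD d ' ' ≠ '_' → x + d ≤ (g.getD y []).length) →
    pvT (((evRow (pvPadded g) prow (y + 2) (x + 1) cells).filter
        (fun e => e.1 == ((y : Int) + 1))).map Prod.snd)
      = (bLetterCols cells x).filter (pvP g y) := by
  intro cells
  induction cells with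
  | nil => intro x _; rfl
  | cons c rest ih =>
    intro x hpre
    rw [evRow, List.filter_append, List.map_append, pvT_append, bLetterCols, List.filter_append,
      ih (x + 1) (fun d hd hc => by
        have h := hpre (d + 1) (by simp only [List.length_cons]; omega) (by simpa using hc)
        omega)]
    congr 1
    rw [evCell_filter_up (pvPadded g) prow (y + 2) (x + 1) c ((y : Int) + 1) (by push_cast; ring)]
    rw [show (((y + 2 : Nat) : Int) - 1) = ((y : Int) + 1) from by push_cast; ring]
    by_cases hc : c = '_'
    · simp [hc, pvT]
    · have hx : x ≤ (g.getD y []).length := by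
        have h := hpre 0 (by simp) (by simpa using hc)
        omega
      rw [show (if c ≠ '_' then [(x : Int)] else []) = [(x : Int)] from by simp [hc]]
      simp only [ne_eq, hc, not_false_iff, true_and]
      rw [apply_ite (List.map Prod.snd)]
      simp only [List.map_cons, List.map_nil]
      exact head_vert g y x hy hx

theorem own_aux (g : List (List Char)) (y : Nat) (hy : y < g.length) :
    ∀ (cells : List Char) (x : Nat), x + cells.length = (g.getD y []).length →
    pvT (((evRow (pvPadded g) ('_' :: (g.getD y [] ++ ['_'])) (y + 1) (x + 1) cells).filter
        (fun e => e.1 == ((y : Int) + 1))).map Prod.snd)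
      = (bOwn cells x).filter (pvP g y) := by
  intro cells
  induction cells with
  | nil => intro x _; rfl
  | cons c rest ih =>
    intro x hlen
    rw [evRow, List.filter_append, List.map_append, pvT_append, bOwn, List.filter_append,
      ih (x + 1) (by simp only [List.length_cons] at hlen; omega)]
    congr 1
    rw [evCell_filter_own (pvPadded g) _ (y + 1) (x + 1) c ((y : Int) + 1) (by push_cast; ring)]
    by_cases hc : c = '_'
    · simp [hc, pvT]
    · have hxlt : x < (g.getD y []).length := by
        simp only [List.length_cons] at hlen
        omega
      rw [show (if c ≠ '_' then [(x : Int) - 1, (x : Int) + 1] else [])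
          = [(x : Int) - 1] ++ [(x : Int) + 1] from by simp [hc]]
      rw [List.filter_append, List.map_append, pvT_append]
      simp only [ne_eq, hc, not_false_iff, true_and]
      congr 1
      · rw [apply_ite (List.map Prod.snd)]
        simp only [List.map_cons, List.map_nil]
        exact head_own_left g y x hy hxlt
      · rw [apply_ite (List.map Prod.snd)]
        simp only [List.map_cons, List.map_nil]
        exact head_own_right g y x hy hxlt

-- ===== the three gather segments =====
theorem seg_above (g : List (List Char)) (y : Nat) (hy : y < g.length) :
    (1 ≤ y → (∀ x, x < (g.getD (y-1) []).length → (g.getD (y-1) []).getD x ' ' ≠ '_' →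
        x ≤ (g.getD y []).length)) →
    pvT ((gatherRow (pvPadded g) y (y + 1)).map Prod.snd) =
      (if 0 < (y : Int) then bLetterCols (PySem.List.pyGetD g ((y : Int) - 1) []) 0 else []).filter (pvP g y) := by
  intro hpreh
  by_cases hy1 : 1 ≤ y
  · have hrow : (pvPadded g).getD y [] = '_' :: (g.getD (y - 1) [] ++ ['_']) := by
      rw [List.getD_eq_getElem?_getD, show y = (y - 1) + 1 from by omega,
        pvPadded_get_mid g (y - 1) (by omega)]
      rfl
    rw [gatherRow, hrow, evRow_prow]
    simp only [Nat.cast_add, Nat.cast_one]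
    rw [above_aux g y hy _ (g.getD (y - 1) []) 0 (fun d hd hc => by
      have h := hpreh hy1 d hd hc
      omega)]
    rw [if_pos (by exact_mod_cast hy1),
      show ((y : Int) - 1) = ((y - 1 : Nat) : Int) from by omega,
      PySem.List.pyGetD_natCast]
  · have hy0 : y = 0 := by omega
    subst hy0
    have hrow : (pvPadded g).getD 0 [] = '_' :: (List.replicate 15 '_' ++ ['_']) := by
      rw [List.getD_eq_getElem?_getD, pvPadded_get_zero]
      rfl
    rw [gatherRow, hrow, evRow_of_blank _ _ _ _ 0 (fun c hc => prow_all_pad c hc)]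
    simp [pvT]

theorem seg_own (g : List (List Char)) (y : Nat) (hy : y < g.length) :
    pvT ((gatherRow (pvPadded g) (y + 1) (y + 1)).map Prod.snd) =
      (bOwn (PySem.List.pyGetD g (y : Int) []) 0).filter (pvP g y) := by
  have hrow : (pvPadded g).getD (y + 1) [] = '_' :: (g.getD y [] ++ ['_']) := by
    rw [List.getD_eq_getElem?_getD, pvPadded_get_mid g y hy]
    rfl
  rw [gatherRow, hrow, evRow_prow]
  simp only [Nat.cast_add, Nat.cast_one, PySem.List.pyGetD_natCast]
  exact own_aux g y hy _ 0 (by simp)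

theorem seg_below (g : List (List Char)) (y : Nat) (hy : y < g.length) :
    (y + 1 < g.length → (∀ x, x < (g.getD (y+1) []).length → (g.getD (y+1) []).getD x ' ' ≠ '_' →
        x ≤ (g.getD y []).length)) →
    pvT ((gatherRow (pvPadded g) (y + 2) (y + 1)).map Prod.snd) =
      (if (y : Int) + 1 < (g.length : Int) then bLetterCols (PySem.List.pyGetD g ((y : Int) + 1) []) 0 else []).filter (pvP g y) := by
  intro hpreh
  by_cases hyn : y + 1 < g.length
  · have hrow : (pvPadded g).getD (y + 2) [] = '_' :: (g.getD (y + 1) [] ++ ['_']) := by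
      rw [List.getD_eq_getElem?_getD, show y + 2 = (y + 1) + 1 from rfl,
        pvPadded_get_mid g (y + 1) hyn]
      rfl
    rw [gatherRow, hrow, evRow_prow]
    simp only [Nat.cast_add, Nat.cast_one]
    rw [below_aux g y hy _ (g.getD (y + 1) []) 0 (fun d hd hc => by
      have h := hpreh hyn d hd hc
      omega)]
    rw [if_pos (by exact_mod_cast hyn),
      show ((y : Int) + 1) = ((y + 1 : Nat) : Int) from by push_cast; ring,
      PySem.List.pyGetD_natCast]
  · have hrow : (pvPadded g).getD (y + 2) [] = '_' :: (List.replicate 15 '_' ++ ['_']) := by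
      rw [List.getD_eq_getElem?_getD, show y + 2 = g.length + 1 from by omega, pvPadded_get_last]
      rfl
    rw [gatherRow, hrow, evRow_of_blank _ _ _ _ 0 (fun c hc => prow_all_pad c hc),
      if_neg (by omega)]
    simp [pvT]

-- ===== assembled rows equality =====
theorem rows_eq (board : List String) (hpre : Pre_get_anchor_points board) :
    (PySem.List.slice
        (aRows (pvPadded (board.map String.toList)) 0 (pvPadded (board.map String.toList))
          ((pvPadded (board.map String.toList)).map fun _ => ([] : PySem.Set Int)))
        (some 1) (some (-1))).map
      (fun s => PySem.Set.ofList ((s.filter (fun x => decide (x > 0) && decide (x < 16))).map (fun x => x - 1)))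
    = (PySem.List.pyRange 0 (board.length : Int) 1).map (fun y => bRowAnchors (board.map String.toList) y) := by
  obtain ⟨hp1, hp2, hp3, hp4⟩ := hpre
  have hglen : (board.map String.toList).length = board.length := by simp
  have hgD : ∀ i, i < board.length → (board.map String.toList).getD i [] = (board.getD i "").toList := by
    intro i hi
    rw [List.getD_eq_getElem _ _ (by simpa using hi), List.getElem_map,
      List.getD_eq_getElem _ _ hi]
  set g := board.map String.toList with hg
  have hrapLen : (aRows (pvPadded g) 0 (pvPadded g)
      ((pvPadded g).map fun _ => ([] : PySem.Set Int))).length = g.length + 2 := by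
    rw [aRows_eq_applyEv, applyEv_length, List.length_map, pvPadded_length]
  rw [slice_mid _ g.length hrapLen]
  have hfun : (fun s : PySem.Set Int => PySem.Set.ofList
      ((s.filter (fun x => decide (x > 0) && decide (x < 16))).map (fun x => x - 1))) =
      (fun s : PySem.Set Int => PySem.Set.ofList (pvT s)) := rfl
  rw [hfun]
  apply List.ext_getElem
  · simp only [List.length_map, List.length_take, List.length_drop, hrapLen,
      PySem.List.length_pyRange_one]
    omega
  · intro k h1 h2
    have hk : k < board.length := by
      rw [List.length_map, PySem.List.length_pyRange_one] at h2
      omega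
    have hkg : k < g.length := by omega
    rw [List.getElem_map, List.getElem_take, List.getElem_drop]
    have hval : (aRows (pvPadded g) 0 (pvPadded g)
        ((pvPadded g).map fun _ => ([] : PySem.Set Int)))[1 + k]'(by omega) =
        (aRows (pvPadded g) 0 (pvPadded g)
          ((pvPadded g).map fun _ => ([] : PySem.Set Int))).getD (k + 1) [] := by
      rw [List.getD_eq_getElem _ _ (by omega)]
      congr 1
      omega
    rw [hval, aRows_eq_applyEv, applyEv_getD _ _ (k + 1)
        (fun e he => by
          have h := evBoard_fst_range g e he
          refine ⟨h.1, ?_⟩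
          rw [List.length_map]
          exact h.2)
        (by rw [List.length_map, pvPadded_length]; omega),
      getD_map_const, ← PySem.Set.ofList_eq_foldl,
      filter_evBoard_window (pvPadded g) (k + 1) (by omega) (by rw [pvPadded_length]; omega),
      show k + 1 - 1 = k from by omega]
    simp only [List.map_append]
    rw [ofList_pvT_ofList, pvT_append, pvT_append]
    have hA : 1 ≤ k → ∀ x, x < (g.getD (k - 1) []).length →
        (g.getD (k - 1) []).getD x ' ' ≠ '_' → x ≤ (g.getD k []).length := by
      intro hk1 x hxl hxc
      rw [hgD (k - 1) (by omega)] at hxl hxc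
      have h := hp4 (k - 1) (by omega) x hxl hxc (by omega)
      rw [show k - 1 + 1 = k from by omega] at h
      rw [hgD k hk]
      exact h
    have hB : k + 1 < g.length → ∀ x, x < (g.getD (k + 1) []).length →
        (g.getD (k + 1) []).getD x ' ' ≠ '_' → x ≤ (g.getD k []).length := by
      intro hk1 x hxl hxc
      rw [hgD (k + 1) (by omega)] at hxl hxc
      have h := hp2 (k + 1) (by omega) x hxl hxc (by omega)
      rw [show k + 1 - 1 = k from by omega] at h
      rw [hgD k hk]
      exact h
    rw [seg_above g k hkg hA, seg_own g k hkg, seg_below g k hkg hB]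
    have hk2 : k < (PySem.List.pyRange 0 ((board.length : Nat) : Int) 1).length := by
      rw [PySem.List.length_pyRange_one]
      omega
    have hidx : (PySem.List.pyRange 0 ((board.length : Nat) : Int) 1)[k]'hk2 = (k : Int) := by
      rw [PySem.List.getElem_pyRange_one]
      norm_num
    rw [List.getElem_map, hidx]
    simp only [bRowAnchors, List.filter_append]
    rfl

-- ===== column-transpose machinery (A's last loop = B's comprehension) =====
def colAcc (col : Int) (i : Nat) (rs : List (PySem.Set Int)) (t : PySem.Set Int) : PySem.Set Int :=
  match rs with
  | [] => t
  | s :: rest => colAcc col (i+1) rest (if col ∈ s then PySem.Set.add t (i : Int) else t)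

theorem aColInner_getD (col : Int) (rs : List (PySem.Set Int)) :
    ∀ (i : Nat) (cap : List (PySem.Set Int)), 0 ≤ col → col < cap.length →
    ∀ m : Nat, (aColInner col i rs cap).getD m [] =
      if (m : Int) = col then colAcc col i rs (cap.getD m []) else cap.getD m [] := by
  induction rs with
  | nil => intro i cap _ _ m; simp [aColInner, colAcc]
  | cons s rest ih =>
    intro i cap h0 h1 m
    rw [aColInner, colAcc]
    by_cases hmem : col ∈ s
    · rw [if_pos hmem, if_pos hmem,
        ih (i+1) _ h0 (by rw [length_pvSetAt]; exact h1) m]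
      by_cases hm : (m : Int) = col
      · rw [if_pos hm, if_pos hm, getD_pvSetAt _ _ _ _ h0 h1, if_pos hm]
      · rw [if_neg hm, if_neg hm, getD_pvSetAt _ _ _ _ h0 h1, if_neg hm]
    · rw [if_neg hmem, if_neg hmem, ih (i+1) _ h0 h1 m]

theorem length_aColInner (col : Int) (rs : List (PySem.Set Int)) :
    ∀ (i : Nat) (cap : List (PySem.Set Int)),
    (aColInner col i rs cap).length = cap.length := by
  induction rs with
  | nil => intro i cap; rfl
  | cons s rest ih =>
    intro i cap
    rw [aColInner]
    split
    · rw [ih, length_pvSetAt]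
    · rw [ih]

theorem colsFold_getD (R : List (PySem.Set Int)) (N : Nat) :
    ∀ (n : Nat) (a : Int) (cap : List (PySem.Set Int)), 0 ≤ a → a + n = N → cap.length = N →
    ∀ m : Nat, m < N →
    ((PySem.List.pyRange a (N : Int) 1).foldl (fun cap col => aColInner col 0 R cap) cap).getD m [] =
      if a ≤ (m : Int) then colAcc (m : Int) 0 R (cap.getD m []) else cap.getD m [] := by
  intro n
  induction n with
  | zero =>
    intro a cap h0 hn hlen m hm
    rw [PySem.List.pyRange_one_eq_nil (by omega)]
    simp only [List.foldl_nil]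
    rw [if_neg (by omega)]
  | succ n ih =>
    intro a cap h0 hn hlen m hm
    rw [PySem.List.pyRange_one_cons (by omega), List.foldl_cons,
      ih (a+1) _ (by omega) (by omega) (by rw [length_aColInner]; exact hlen) m hm]
    by_cases hma : a ≤ (m : Int)
    · by_cases hmea : (m : Int) = a
      · rw [if_neg (by omega), if_pos hma,
          aColInner_getD _ _ _ _ h0 (by rw [hlen]; omega) m, if_pos hmea, hmea]
      · rw [if_pos (by omega), if_pos hma,
          aColInner_getD _ _ _ _ h0 (by rw [hlen]; omega) m, if_neg hmea]
    · rw [if_neg (by omega), if_neg hma,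
        aColInner_getD _ _ _ _ h0 (by rw [hlen]; omega) m, if_neg (by omega)]

theorem colAcc_append (col : Int) (s : PySem.Set Int) :
    ∀ (rs : List (PySem.Set Int)) (i : Nat) (t : PySem.Set Int),
    colAcc col i (rs ++ [s]) t =
      if col ∈ s then PySem.Set.add (colAcc col i rs t) ((i + rs.length : Nat) : Int)
      else colAcc col i rs t := by
  intro rs
  induction rs with
  | nil => intro i t; simp [colAcc]
  | cons r rest ih =>
    intro i t
    rw [List.cons_append, colAcc, ih]
    simp only [colAcc]
    rw [show (((i+1) + rest.length : Nat) : Int) = ((i + (r :: rest).length : Nat) : Int) from by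
      simp; omega]

theorem colAcc_eq_ofList (col : Int) :
    ∀ (rs : List (PySem.Set Int)),
    colAcc col 0 rs [] =
      PySem.Set.ofList ((PySem.List.pyRange 0 (rs.length : Int) 1).filter
        (fun i => decide (col ∈ PySem.List.pyGetD rs i []))) := by
  intro rs
  induction rs using List.reverseRecOn with
  | nil => simp [colAcc, PySem.List.pyRange_one_eq_nil, PySem.Set.ofList]
  | append_singleton rest s ih =>
    rw [colAcc_append]
    have hrange : (PySem.List.pyRange 0 ((rest ++ [s]).length : Int) 1) =
        (PySem.List.pyRange 0 (rest.length : Int) 1) ++ [(rest.length : Int)] := by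
      have h3 : ((rest ++ [s]).length : Int) = (rest.length : Int) + 1 := by simp
      rw [h3, PySem.List.pyRange_one_succ_right (by omega)]
    rw [hrange, List.filter_append]
    have hfcong : (PySem.List.pyRange 0 (rest.length : Int) 1).filter
          (fun i => decide (col ∈ PySem.List.pyGetD (rest ++ [s]) i [])) =
        (PySem.List.pyRange 0 (rest.length : Int) 1).filter
          (fun i => decide (col ∈ PySem.List.pyGetD rest i [])) := by
      apply List.filter_congr
      intro i hi
      have hmem := PySem.List.mem_pyRange_one.mp hi
      have h4 : PySem.List.pyGetD (rest ++ [s]) i [] = PySem.List.pyGetD rest i [] := by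
        rw [PySem.List.pyGetD_eq_getElem _ _ (by omega) (by simp; omega),
          PySem.List.pyGetD_eq_getElem _ _ (by omega) (by omega)]
        exact List.getElem_append_left (by omega)
      rw [h4]
    rw [hfcong]
    have hlast : PySem.List.pyGetD (rest ++ [s]) (rest.length : Int) [] = s := by
      rw [PySem.List.pyGetD_eq_getElem _ _ (by omega) (by simp)]
      simp
    by_cases hmem : col ∈ s
    · rw [if_pos hmem]
      have h5 : List.filter (fun i => decide (col ∈ PySem.List.pyGetD (rest ++ [s]) i []))
          [(rest.length : Int)] = [(rest.length : Int)] := by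
        simp [List.filter, hlast, hmem]
      rw [h5, PySem.Set.ofList_append_singleton, ih]
      congr 1
      simp
    · rw [if_neg hmem]
      have h5 : List.filter (fun i => decide (col ∈ PySem.List.pyGetD (rest ++ [s]) i []))
          [(rest.length : Int)] = [] := by
        simp [List.filter, hlast, hmem]
      rw [h5, List.append_nil, ih]

theorem length_foldl_aColInner (R : List (PySem.Set Int)) :
    ∀ (l : List Int) (cap : List (PySem.Set Int)),
    (l.foldl (fun cap col => aColInner col 0 R cap) cap).length = cap.length := by
  intro l
  induction l with
  | nil => intro cap; rfl
  | cons c cs ih => intro cap; rw [List.foldl_cons, ih, length_aColInner]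

theorem cols_eq (N : Nat) (R cap0 : List (PySem.Set Int)) (hR : R.length = N)
    (hlen : cap0.length = N) (hinit : ∀ m : Nat, cap0.getD m [] = []) :
    (PySem.List.pyRange 0 (N : Int) 1).foldl (fun cap col => aColInner col 0 R cap) cap0 =
      (PySem.List.pyRange 0 (N : Int) 1).map (fun j =>
        PySem.Set.ofList ((PySem.List.pyRange 0 (N : Int) 1).filter
          (fun i => decide (j ∈ PySem.List.pyGetD R i [])))) := by
  have hrlen : (PySem.List.pyRange 0 (N : Int) 1).length = N := by
    rw [PySem.List.length_pyRange_one]; omega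
  apply List.ext_getElem
  · rw [length_foldl_aColInner, hlen, List.length_map, hrlen]
  · intro k h1 h2
    have hk15 : k < N := by rw [length_foldl_aColInner, hlen] at h1; exact h1
    have hL : ((PySem.List.pyRange 0 (N : Int) 1).foldl (fun cap col => aColInner col 0 R cap) cap0)[k] =
        ((PySem.List.pyRange 0 (N : Int) 1).foldl (fun cap col => aColInner col 0 R cap) cap0).getD k [] :=
      (List.getD_eq_getElem _ [] h1).symm
    rw [hL, colsFold_getD R N N 0 cap0 (by omega) (by omega) hlen k hk15,
      if_pos (by omega), hinit k, colAcc_eq_ofList, hR]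
    rw [List.getElem_map, PySem.List.getElem_pyRange_one]
    norm_num

-- ===== VERDICT (by name: the statement is the Claim_ definition above) =====
theorem get_anchor_points_spec : Claim_equal_get_anchor_points := by
  intro board hdom hpre
  unfold Spec_get_anchor_points get_anchor_points get_anchor_points_alt
  dsimp only
  rw [Prod.mk.injEq]
  have hROWS := rows_eq board hpre
  refine ⟨hROWS, ?_⟩
  rw [hROWS]
  have hRlen : ((PySem.List.pyRange 0 (board.length : Int) 1).map
      (fun y => bRowAnchors (board.map String.toList) y)).length = board.length := by
    rw [List.length_map, PySem.List.length_pyRange_one]; omega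
  exact cols_eq board.length _ _ hRlen (by simp) (fun m => getD_map_const _ m)
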